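/- GENERATED by c/gen_decode.py: decode facts of the image, one per distinct instruction byte string. -/
import UserX.DecodeImage

#decode_all Vorbis.Dec
  "03ab98000000"  -- add ebp,DWORD PTR [rbx+0x98]
  "0f841affffff"  -- je 1112b5
  "0f84d5000000"  -- je 10f29c
  "0f87cb000000"  -- ja 109005
  "0f8ebefdffff"  -- jle 114594
  "0fb65c2410"  -- movzx ebx,BYTE PTR [rsp+0x10]
  "38d0"  -- cmp al,dl
  "410faf36"  -- imul esi,DWORD PTR [r14]
  "4139c6"  -- cmp r14d,eax
  "4183fd02"  -- cmp r13d,0x2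
  "418b0424"  -- mov eax,DWORD PTR [r12]
  "41c1fc03"  -- sar r12d,0x3
  "428d04b500000000"  -- lea eax,[r14*4+0x0]
  "44397504"  -- cmp DWORD PTR [rbp+0x4],r14d
  "44896b5c"  -- mov DWORD PTR [rbx+0x5c],r13d
  "4489e5"  -- mov ebp,r12d
  "448b7d00"  -- mov r15d,DWORD PTR [rbp+0x0]
  "450fb7745d00"  -- movzx r14d,WORD PTR [r13+rbx*2+0x0]
  "4589f4"  -- mov r12d,r14d
  "478d743d00"  -- lea r14d,[r13+r15*1+0x0]
  "4863542408"  -- movsxd rdx,DWORD PTR [rsp+0x8]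
  "4881ec880b0000"  -- sub rsp,0xb88
  "4885f6"  -- test rsi,rsi
  "4889c7"  -- mov rdi,rax
  "488b5c2428"  -- mov rbx,QWORD PTR [rsp+0x28]
  "488d04d500000000"  -- lea rax,[rdx*8+0x0]
  "488d7b02"  -- lea rdi,[rbx+0x2]
  "488d7e08"  -- lea rdi,[rsi+0x8]
  "488dbbd8010000"  -- lea rdi,[rbx+0x1d8]
  "488dbfc8010000"  -- lea rdi,[rdi+0x1c8]
  "48c7819c00c00000000000"  -- mov QWORD PTR [rcx+0xc0009c],0x0
  "4963c4"  -- movsxd rax,r12d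
  "4989df"  -- mov r15,rbx
  "498d7c24ec"  -- lea rdi,[r12-0x14]
  "498dbee0060000"  -- lea rdi,[r14+0x6e0]
  "4a8d7ced00"  -- lea rdi,[rbp+r13*8+0x0]
  "4c39e3"  -- cmp rbx,r12
  "4c89c3"  -- mov rbx,r8
  "4c8ba3a8000000"  -- mov r12,QWORD PTR [rbx+0xa8]
  "4c8db0a8000000"  -- lea r14,[rax+0xa8]
  "4d8bada8000000"  -- mov r13,QWORD PTR [r13+0xa8]
  "660f28d1"  -- movapd xmm2,xmm1
  "66410f6ee7"  -- movd xmm4,r15d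
  "66837b0200"  -- cmp WORD PTR [rbx+0x2],0x0
  "741f"  -- je 10dd3d
  "750b"  -- jne 102cfd
  "773a"  -- ja 113eda
  "7e09"  -- jle 10defd
  "7fc5"  -- jg 1075e8
  "83bb8800000000"  -- cmp DWORD PTR [rbx+0x88],0x0
  "8844240f"  -- mov BYTE PTR [rsp+0xf],al
  "89742408"  -- mov DWORD PTR [rsp+0x8],esi
  "89f0"  -- mov eax,esi
  "8b5c2424"  -- mov ebx,DWORD PTR [rsp+0x24]
  "8b93e8060000"  -- mov edx,DWORD PTR [rbx+0x6e8]
  "b902000000"  -- mov ecx,0x2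
  "c1ea04"  -- shr edx,0x4
  "c780cc00c000f2f2f2f2"  -- mov DWORD PTR [rax+0xc000cc],0xf2f2f2f2
  "d3ff"  -- sar edi,cl
  "e809caffff"  -- call 100720
  "e814acffff"  -- call 100640
  "e81ca6ffff"  -- call 100640
  "e827c1feff"  -- call 1018c0
  "e82fd5feff"  -- call 100300
  "e839f8feff"  -- call 100640
  "e84570ffff"  -- call 100640
  "e84fadffff"  -- call 100640
  "e85af1ffff"  -- call 10d5c0
  "e8697effff"  -- call 10d1c0
  "e874a5ffff"  -- call 100640
  "e87e90ffff"  -- call 1016e0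
  "e88a13ffff"  -- call 100640
  "e893cafeff"  -- call 100720
  "e89e70ffff"  -- call 100720
  "e8a8a6ffff"  -- call 100640
  "e8b1fbffff"  -- call 107500
  "e8bc46ffff"  -- call 1008e0
  "e8c72dffff"  -- call 108f20
  "e8d07fffff"  -- call 10d1c0
  "e8db12ffff"  -- call 100300
  "e8e4aaffff"  -- call 110a60
  "e8ece9feff"  -- call 103d00
  "e8f793ffff"  -- call 100640
  "e90bf9ffff"  -- jmp 115f67
  "e94ffdffff"  -- jmp 113b22
  "e9a2feffff"  -- jmp 10b3f3
  "e9f4feffff"  -- jmp 119769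
  "eb84"  -- jmp 108773
  "ebe2"  -- jmp 10821e
  "f20f5805b7d70100"  -- addsd xmm0,QWORD PTR [rip+0x1d7b7]
  "f20f5e15bbd90100"  -- divsd xmm2,QWORD PTR [rip+0x1d9bb]
  "f30f1053dc"  -- movss xmm2,DWORD PTR [rbx-0x24]
  "f30f1075a8"  -- movss xmm6,DWORD PTR [rbp-0x58]
  "f30f1153f8"  -- movss DWORD PTR [rbx-0x8],xmm2
  "f30f1175b8"  -- movss DWORD PTR [rbp-0x48],xmm6
  "f30f58e0"  -- addss xmm4,xmm0
  "f30f59f1"  -- mulss xmm6,xmm1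
  "f3410f1044240c"  -- movss xmm0,DWORD PTR [r12+0xc]
  "f3410f594614"  -- mulss xmm0,DWORD PTR [r14+0x14]
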